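-- pv_equiv track=rewrite | github.com/Reginaldo1107/guia7-PYTHON | primeraparte.py | vocalesDistintas3
-- ===== SOURCE A (Python) =====
-- def vocalesDistintas3 (palabra :str) ->bool:
--     vocalA :int = 0
--     vocalE :int = 0
--     vocalI :int = 0
--     vocalO :int = 0
--     vocalU :int = 0
--     vocales3DistintasNunero :int  = 0
--     tiene3vocales :bool = False
--     for i in range (0 ,len(palabra),1):
--         if(palabra[i]== 'a'):
--             vocalA = 1
--         elif (palabra[i]== 'e'):
--             vocalE = 1
--         elif(palabra[i]== 'i'):
--             vocalI = 1
--         elif (palabra[i]== 'o'):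
--             vocalO = 1
--         elif (palabra[i]== 'u'):
--             vocalU = 1
--     vocales3DistintasNunero =  vocalA + vocalE + vocalI + vocalO + vocalU
--     if(vocales3DistintasNunero>= 3):
--         tiene3vocales = True
--
--     return tiene3vocales
-- ===== SOURCE B (Python) =====
-- def vocalesDistintas3(palabra: str) -> bool:
--     return sum(v in palabra for v in "aeiou") >= 3
-- ===== Notes on version B (the rewrite author's own statement) =====
-- stated objective: idiomatic
-- what changed: Instead of scanning the word with a five-way if/elif cascade maintaining five flag integers, B iterates over the five vowels and sums C-level membership tests against the word, comparing the count to 3.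
import Mathlib
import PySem

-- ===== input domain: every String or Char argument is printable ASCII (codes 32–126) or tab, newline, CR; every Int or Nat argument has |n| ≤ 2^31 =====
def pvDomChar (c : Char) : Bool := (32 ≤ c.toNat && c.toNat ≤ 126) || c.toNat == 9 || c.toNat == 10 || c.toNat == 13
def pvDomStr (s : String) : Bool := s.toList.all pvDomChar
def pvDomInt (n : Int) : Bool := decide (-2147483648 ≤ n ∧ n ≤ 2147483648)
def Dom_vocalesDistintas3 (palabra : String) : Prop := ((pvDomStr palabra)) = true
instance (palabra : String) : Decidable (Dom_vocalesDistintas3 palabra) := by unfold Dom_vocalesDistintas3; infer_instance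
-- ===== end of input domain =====

-- B replaces A's per-character five-way if/elif cascade over five flag integers by iterating
-- over the five vowels and summing membership tests against the word (idiomatic; same cost).

-- ===== PORT A =====
-- the for-loop over palabra[i], i in range(0, len(palabra), 1), as a fold over the characters;
-- state = (vocalA, vocalE, vocalI, vocalO, vocalU), branches in A's order
def vocalesDistintas3_step (st : Int × Int × Int × Int × Int) (c : Char) :
    Int × Int × Int × Int × Int :=
  if c = 'a' then (1, st.2.1, st.2.2.1, st.2.2.2.1, st.2.2.2.2)
  else if c = 'e' then (st.1, 1, st.2.2.1, st.2.2.2.1, st.2.2.2.2)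
  else if c = 'i' then (st.1, st.2.1, 1, st.2.2.2.1, st.2.2.2.2)
  else if c = 'o' then (st.1, st.2.1, st.2.2.1, 1, st.2.2.2.2)
  else if c = 'u' then (st.1, st.2.1, st.2.2.1, st.2.2.2.1, 1)
  else st

def vocalesDistintas3 (palabra : String) : Bool :=
  let st := palabra.toList.foldl vocalesDistintas3_step (0, 0, 0, 0, 0)
  let vocales3DistintasNunero : Int := st.1 + st.2.1 + st.2.2.1 + st.2.2.2.1 + st.2.2.2.2
  if vocales3DistintasNunero ≥ 3 then true else false

-- ===== PORT B =====
-- sum(v in palabra for v in "aeiou") >= 3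
def vocalesDistintas3_alt (palabra : String) : Bool :=
  decide (3 ≤ (("aeiou".toList.map (fun v => if palabra.toList.contains v then (1 : Int) else 0)).sum))

-- ===== PRECONDITION & SPEC =====
def Spec_vocalesDistintas3 (palabra : String) (out : Bool) : Prop := out = vocalesDistintas3_alt palabra
instance (palabra : String) (out : Bool) : Decidable (Spec_vocalesDistintas3 palabra out) := by unfold Spec_vocalesDistintas3; infer_instance

-- ===== CLAIM (what is proved, stated in full; the proofs are below) =====
def Claim_equal_vocalesDistintas3 : Prop := ∀ (palabra : String), Dom_vocalesDistintas3 palabra → Spec_vocalesDistintas3 palabra (vocalesDistintas3 palabra)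

-- ===== LEMMAS AND PROOFS =====

-- the fold's final state: each flag is 1 iff its vowel occurs (or the flag started as such)
theorem vocalesDistintas3_fold (l : List Char) (a e i o u : Int) :
    l.foldl vocalesDistintas3_step (a, e, i, o, u) =
      ((if 'a' ∈ l then 1 else a), (if 'e' ∈ l then 1 else e), (if 'i' ∈ l then 1 else i),
       (if 'o' ∈ l then 1 else o), (if 'u' ∈ l then 1 else u)) := by
  induction l generalizing a e i o u with
  | nil => simp
  | cons c t ih =>
    simp only [List.foldl_cons, vocalesDistintas3_step, List.mem_cons]
    by_cases h1 : c = 'a' <;> by_cases h2 : c = 'e' <;> by_cases h3 : c = 'i' <;>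
      by_cases h4 : c = 'o' <;> by_cases h5 : c = 'u' <;>
      simp [h1, h2, h3, h4, h5, ih, eq_comm]

-- ===== VERDICT (by name: the statement is the Claim_ definition above) =====
theorem vocalesDistintas3_spec : Claim_equal_vocalesDistintas3 := by
  intro palabra _
  unfold Spec_vocalesDistintas3 vocalesDistintas3 vocalesDistintas3_alt
  rw [vocalesDistintas3_fold]
  have hv : "aeiou".toList = ['a', 'e', 'i', 'o', 'u'] := rfl
  rw [hv]
  simp only [List.map_cons, List.map_nil, List.sum_cons, List.sum_nil,
    List.contains_eq_mem, decide_eq_true_eq]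
  by_cases ha : 'a' ∈ palabra.toList <;> by_cases he : 'e' ∈ palabra.toList <;>
    by_cases hi : 'i' ∈ palabra.toList <;> by_cases ho : 'o' ∈ palabra.toList <;>
    by_cases hu : 'u' ∈ palabra.toList <;>
    simp [ha, he, hi, ho, hu]
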